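-- pv_equiv track=rewrite | github.com/hjk0761/Almumol | hjk0761/02211/2211.py | find
-- ===== SOURCE A (Python) =====
-- from collections import deque
--
-- def find(parent):
--     path = []
--     visited = set()
--     q = deque()
--     q.append(1)
--     while q:
--         cur = q.popleft()
--         if cur in visited:
--             continue
--         visited.add(cur)
--         for i in range(len(parent)):
--             if i not in visited and parent[i] == cur:
--                 q.append(i)
--                 path.append((cur, i))
--     return path
-- ===== SOURCE B (Python) =====
-- from collections import deque
--
-- def find(parent):
--     # One pass builds a value -> child-indices adjacency map; the BFS then
--     # consults only that map instead of rescanning the parent array per node.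
--     children = {}
--     for i, p in enumerate(parent):
--         children.setdefault(p, []).append(i)
--     path = []
--     visited = {1}
--     q = deque()
--     q.append(1)
--     while q:
--         cur = q.popleft()
--         for i in children.get(cur, []):
--             if i not in visited:
--                 visited.add(i)
--                 q.append(i)
--                 path.append((cur, i))
--     return path
-- ===== Notes on version B (the rewrite author's own statement) =====
-- stated objective: alternative
-- what changed: B precomputes a parent-value -> child-indices adjacency dict in one pass and each BFS pop consults only that dict, instead of A's rescan of the whole parent array at every visited node; it trades a dict-building pass for the per-node rescans.
import Mathlib
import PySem

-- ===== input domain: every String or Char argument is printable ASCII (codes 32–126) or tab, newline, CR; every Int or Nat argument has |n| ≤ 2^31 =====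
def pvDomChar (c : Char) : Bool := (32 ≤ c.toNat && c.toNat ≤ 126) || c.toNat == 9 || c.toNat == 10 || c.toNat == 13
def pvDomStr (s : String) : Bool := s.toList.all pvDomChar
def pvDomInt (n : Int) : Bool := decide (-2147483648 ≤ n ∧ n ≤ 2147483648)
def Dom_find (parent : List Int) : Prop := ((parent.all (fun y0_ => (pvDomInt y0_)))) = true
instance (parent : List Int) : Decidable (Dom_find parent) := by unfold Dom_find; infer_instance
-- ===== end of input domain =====

-- B replaces A's per-node rescan of the whole parent array by a parent-value -> children
-- adjacency dict built in one pass; same BFS edge list by a different traversal mechanism.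

-- ===== PORT A =====
-- A's 'while q' is ported with fuel parent.length + 2: each index is enqueued at most once
-- (plus the initial 1), so the loop body runs at most parent.length + 2 times and the fuel
-- is never exhausted.  parent[i] with i drawn from range(len(parent)) is always in range,
-- so pyGetD is exact for the subscript.
def findLoopA (parent : List Int) :
    Nat → List Int → PySem.Set Int → List (Int × Int) → List (Int × Int)
  | 0, _, _, path => path
  | _ + 1, [], _, path => path
  | fuel + 1, cur :: q, visited, path =>
    if PySem.Set.contains visited cur then findLoopA parent fuel q visited path
    else
      let visited' := PySem.Set.add visited cur
      let st := (PySem.List.pyRange 0 (PySem.List.len parent)).foldl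
        (fun (st : List Int × List (Int × Int)) i =>
          if (!PySem.Set.contains visited' i) && (PySem.List.pyGetD parent i 0 == cur)
          then (st.1 ++ [i], st.2 ++ [(cur, i)]) else st) (q, path)
      findLoopA parent fuel st.1 visited' st.2

def find (parent : List Int) : List (Int × Int) :=
  findLoopA parent (parent.length + 2) [1] PySem.Set.empty []

-- ===== PORT B =====
-- children.setdefault(p, []).append(i)  ==  d[p] = d.get(p, []) + [i]  ==  Dict.modify
def buildChildren (parent : List Int) : PySem.Dict Int (List Int) :=
  (PySem.List.enumerate parent).foldl
    (fun d pr => d.modify pr.2 [] (fun l => l ++ [pr.1])) PySem.Dict.empty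

-- same fuel convention as A's loop (each index is enqueued at most once)
def findLoopB (children : PySem.Dict Int (List Int)) :
    Nat → List Int → PySem.Set Int → List (Int × Int) → List (Int × Int)
  | 0, _, _, path => path
  | _ + 1, [], _, path => path
  | fuel + 1, cur :: q, visited, path =>
    let st := (children.getD cur []).foldl
      (fun (st : List Int × PySem.Set Int × List (Int × Int)) i =>
        if PySem.Set.contains st.2.1 i then st
        else (st.1 ++ [i], PySem.Set.add st.2.1 i, st.2.2 ++ [(cur, i)])) (q, visited, path)
    findLoopB children fuel st.1 st.2.1 st.2.2

def find_alt (parent : List Int) : List (Int × Int) :=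
  findLoopB (buildChildren parent) (parent.length + 2) [1] (PySem.Set.ofList [1]) []

-- ===== PRECONDITION & SPEC =====
def Spec_find (parent : List Int) (out : List (Int × Int)) : Prop := out = find_alt parent
instance (parent : List Int) (out : List (Int × Int)) : Decidable (Spec_find parent out) := by unfold Spec_find; infer_instance

-- ===== CLAIM (what is proved, stated in full; the proofs are below) =====
def Claim_equal_find : Prop := ∀ (parent : List Int), Dom_find parent → Spec_find parent (find parent)

-- ===== LEMMAS AND PROOFS =====

-- the children dict looks up exactly the indices whose parent value is c, in index order
lemma getD_buildChildren (parent : List Int) (c : Int) :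
    (buildChildren parent).getD c []
      = (PySem.List.pyRange 0 (PySem.List.len parent)).filter
          (fun j => PySem.List.pyGetD parent j 0 == c) := by
  unfold buildChildren
  rw [PySem.List.enumerate_eq_map_pyRange parent 0, List.foldl_map]
  have h : (PySem.List.pyRange 0 (PySem.List.len parent)).foldl
        (fun (d : PySem.Dict Int (List Int)) j =>
          d.modify (PySem.List.pyGetD parent j 0) [] (fun l => l ++ [j])) PySem.Dict.empty
      = ((PySem.List.pyRange 0 (PySem.List.len parent)).map
          (fun j => (PySem.List.pyGetD parent j 0, j))).foldl
        (fun d p => d.modify p.1 [] (fun l => l ++ [p.2])) PySem.Dict.empty := by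
    rw [List.foldl_map]
  rw [h, PySem.Dict.getD_foldl_modify_append, List.filter_map, List.map_map]
  simp [Function.comp_def]

-- B's inner loop over a duplicate-free children list appends exactly the not-yet-visited
-- children to the queue, the visited set and the path
lemma foldB_eq (cur : Int) (ks : List Int) (hnd : ks.Nodup) :
    ∀ (q : List Int) (vis : PySem.Set Int) (path : List (Int × Int)),
    ks.foldl
      (fun (st : List Int × PySem.Set Int × List (Int × Int)) i =>
        if PySem.Set.contains st.2.1 i then st
        else (st.1 ++ [i], PySem.Set.add st.2.1 i, st.2.2 ++ [(cur, i)])) (q, vis, path)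
    = (q ++ ks.filter (fun i => !PySem.Set.contains vis i),
       vis ++ ks.filter (fun i => !PySem.Set.contains vis i),
       path ++ (ks.filter (fun i => !PySem.Set.contains vis i)).map (fun i => (cur, i))) := by
  induction ks with
  | nil => intro q vis path; simp
  | cons k ks ih =>
    intro q vis path
    have hk : k ∉ ks := (List.nodup_cons.mp hnd).1
    have hnd' : ks.Nodup := (List.nodup_cons.mp hnd).2
    by_cases hv : PySem.Set.contains vis k = true
    · rw [List.foldl_cons, if_pos (by exact hv), ih hnd' q vis path]
      have hvm : k ∈ (vis : List Int) := by simpa [PySem.Set.contains] using hv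
      have hfk : (k :: ks).filter (fun i => !PySem.Set.contains vis i)
          = ks.filter (fun i => !PySem.Set.contains vis i) := by
        rw [List.filter_cons]; simp [PySem.Set.contains, hvm]
      rw [hfk]
    · have hvf : PySem.Set.contains vis k = false := by
        cases h : PySem.Set.contains vis k
        · rfl
        · exact absurd h hv
      have hadd : PySem.Set.add vis k = vis ++ [k] := by
        simp [PySem.Set.add, PySem.Set.contains] at hvf ⊢
        intro h; exact absurd h hvf
      have hfc : ks.filter (fun i => !PySem.Set.contains (vis ++ [k]) i)
          = ks.filter (fun i => !PySem.Set.contains vis i) := by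
        apply List.filter_congr
        intro i hi
        have hik : i ≠ k := fun e => hk (e ▸ hi)
        simp [PySem.Set.contains, hik]
      rw [List.foldl_cons, if_neg (by exact hv), ih hnd' (q ++ [k]) (PySem.Set.add vis k)
        (path ++ [(cur, k)]), hadd, hfc]
      have hvm : k ∉ (vis : List Int) := by simpa [PySem.Set.contains] using hv
      have hfk : (k :: ks).filter (fun i => !PySem.Set.contains vis i)
          = k :: ks.filter (fun i => !PySem.Set.contains vis i) := by
        rw [List.filter_cons]; simp [PySem.Set.contains, hvm]
      rw [hfk]
      simp

-- A's inner loop over range(len(parent)) filters and appends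
lemma foldA_eq (parent : List Int) (cur : Int) (visited' : PySem.Set Int)
    (q : List Int) (path : List (Int × Int)) :
    (PySem.List.pyRange 0 (PySem.List.len parent)).foldl
      (fun (st : List Int × List (Int × Int)) i =>
        if (!PySem.Set.contains visited' i) && (PySem.List.pyGetD parent i 0 == cur)
        then (st.1 ++ [i], st.2 ++ [(cur, i)]) else st) (q, path)
    = (q ++ (PySem.List.pyRange 0 (PySem.List.len parent)).filter
          (fun i => (!PySem.Set.contains visited' i) && (PySem.List.pyGetD parent i 0 == cur)),
       path ++ ((PySem.List.pyRange 0 (PySem.List.len parent)).filter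
          (fun i => (!PySem.Set.contains visited' i) && (PySem.List.pyGetD parent i 0 == cur))).map
            (fun i => (cur, i))) := by
  have hfun : (fun (st : List Int × List (Int × Int)) (i : Int) =>
        if (!PySem.Set.contains visited' i) && (PySem.List.pyGetD parent i 0 == cur)
        then (st.1 ++ [i], st.2 ++ [(cur, i)]) else st)
      = (fun st i =>
        ((fun (a : List Int) (i : Int) =>
            if (!PySem.Set.contains visited' i) && (PySem.List.pyGetD parent i 0 == cur)
            then a ++ [i] else a) st.1 i,
         (fun (b : List (Int × Int)) (i : Int) =>
            if (!PySem.Set.contains visited' i) && (PySem.List.pyGetD parent i 0 == cur)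
            then b ++ [(cur, i)] else b) st.2 i)) := by
    funext st i
    by_cases h : ((!PySem.Set.contains visited' i) && (PySem.List.pyGetD parent i 0 == cur)) = true
    · rw [if_pos h]; dsimp only; rw [if_pos h, if_pos h]
    · rw [if_neg h]; dsimp only; rw [if_neg h, if_neg h]
  rw [hfun, PySem.List.foldl_prod_mk
      (f := fun (a : List Int) (i : Int) =>
        if (!PySem.Set.contains visited' i) && (PySem.List.pyGetD parent i 0 == cur)
        then a ++ [i] else a)
      (g := fun (b : List (Int × Int)) (i : Int) =>
        if (!PySem.Set.contains visited' i) && (PySem.List.pyGetD parent i 0 == cur)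
        then b ++ [(cur, i)] else b),
    PySem.List.foldl_append_if_eq_filter, PySem.List.foldl_append_if]

-- The BFS invariant tying the two loops together: same queue and path, A's visited set is
-- the popped nodes, B's visited set answers "popped or queued"; queued nodes are distinct,
-- unpopped, and every queued node behind the head has an already-popped parent value.
lemma loop_eq (parent : List Int) : ∀ (fuel : Nat) (q : List Int)
    (VA VB : PySem.Set Int) (path : List (Int × Int)),
    q.Nodup →
    (∀ j ∈ q, j ∉ (VA : List Int)) →
    (∀ j ∈ q.drop 1, PySem.List.pyGetD parent j 0 ∈ (VA : List Int)) →
    (∀ x : Int, x ∈ (VB : List Int) ↔ x ∈ (VA : List Int) ∨ x ∈ q) →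
    findLoopA parent fuel q VA path = findLoopB (buildChildren parent) fuel q VB path := by
  intro fuel
  induction fuel with
  | zero => intro q VA VB path _ _ _ _; rfl
  | succ fuel ih =>
    intro q VA VB path h1 h2 h3 hVB
    cases q with
    | nil => rfl
    | cons cur rest =>
      have hcurmem : cur ∉ (VA : List Int) := h2 cur (by simp)
      have hcur : PySem.Set.contains VA cur = false := by
        simpa [PySem.Set.contains] using hcurmem
      rw [findLoopA, findLoopB]
      rw [if_neg (by rw [hcur]; exact Bool.false_ne_true)]
      dsimp only
      rw [foldA_eq]
      set VA' := PySem.Set.add VA cur with hVA'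
      have hVA'eq : VA' = VA ++ [cur] := by
        simp [hVA', PySem.Set.add, PySem.Set.contains] at hcurmem ⊢
        intro h; exact absurd h hcurmem
      set c := fun i => (!PySem.Set.contains VA' i) && (PySem.List.pyGetD parent i 0 == cur)
        with hc
      set L := (PySem.List.pyRange 0 (PySem.List.len parent)).filter c with hL
      have hLnd : L.Nodup := (PySem.List.nodup_pyRange_one 0 (PySem.List.len parent)).filter c
      have hLmem : ∀ i ∈ L, (i ∉ (VA : List Int) ∧ i ≠ cur)
          ∧ PySem.List.pyGetD parent i 0 = cur := by
        intro i hi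
        have h' := (List.mem_filter.mp hi).2
        simp only [hc, Bool.and_eq_true, Bool.not_eq_true', beq_iff_eq] at h'
        refine ⟨?_, h'.2⟩
        have := h'.1
        rw [hVA'eq] at this
        simp only [PySem.Set.contains] at this
        constructor
        · intro hmem
          have : List.contains (VA ++ [cur]) i = true := by
            simp; exact Or.inl (by simpa using hmem)
          simp_all
        · intro he
          have : List.contains (VA ++ [cur]) i = true := by
            simp [he]
          simp_all
      have hdisj : ∀ i ∈ rest, i ∉ L := by
        intro i hir hiL
        have hpar := h3 i (by simpa using hir)
        rw [(hLmem i hiL).2] at hpar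
        exact hcurmem hpar
      have hchild := getD_buildChildren parent cur
      have hndchild : ((buildChildren parent).getD cur []).Nodup := by
        rw [hchild]; exact (PySem.List.nodup_pyRange_one 0 (PySem.List.len parent)).filter _
      rw [foldB_eq cur _ hndchild]
      have hfeq : ((buildChildren parent).getD cur []).filter
          (fun i => !PySem.Set.contains VB i) = L := by
        rw [hchild, List.filter_filter, hL]
        apply List.filter_congr
        intro i hi
        by_cases hp : PySem.List.pyGetD parent i 0 = cur
        · have hirest : i ∉ rest := by
            intro hr
            exact hcurmem (hp ▸ h3 i (by simpa using hr))
          have hmemB : i ∈ (VB : List Int) ↔ i ∈ (VA' : List Int) := by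
            rw [hVA'eq]
            simp only [List.mem_append, List.mem_singleton]
            rw [hVB i]
            simp only [List.mem_cons]
            constructor
            · rintro (h | h | h)
              · exact Or.inl h
              · exact Or.inr h
              · exact absurd h hirest
            · rintro (h | h)
              · exact Or.inl h
              · exact Or.inr (Or.inl h)
          simp [hc, hp, hmemB, Bool.and_comm]
        · have hb : (PySem.List.pyGetD parent i 0 == cur) = false := by simpa using hp
          simp [hc, hb]
      rw [hfeq]
      apply ih (rest ++ L) VA' (VB ++ L) _
      · refine List.Nodup.append (List.nodup_cons.mp h1).2 hLnd ?_
        intro i hir hiL; exact hdisj i hir hiL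
      · intro j hj
        rw [hVA'eq]
        simp only [List.mem_append, List.mem_singleton]
        rcases List.mem_append.mp hj with hr | hl
        · rintro (hmem | he)
          · exact h2 j (by simp [hr]) hmem
          · exact (List.nodup_cons.mp h1).1 (he ▸ hr)
        · rintro (hmem | he)
          · exact ((hLmem j hl).1).1 hmem
          · exact ((hLmem j hl).1).2 he
      · intro j hj
        have hj' : j ∈ rest ++ L := List.mem_of_mem_drop hj
        rw [hVA'eq]
        simp only [List.mem_append, List.mem_singleton]
        rcases List.mem_append.mp hj' with hr | hl
        · exact Or.inl (h3 j (by simpa using hr))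
        · exact Or.inr ((hLmem j hl).2)
      · intro x
        rw [hVA'eq]
        simp only [List.mem_append, hVB x, List.mem_cons]
        tauto

theorem find_spec : Claim_equal_find := by
  unfold Claim_equal_find
  intro parent _
  unfold Spec_find find find_alt
  apply loop_eq
  · simp
  · intro j hj
    simp only [List.mem_singleton] at hj
    subst hj
    simp [PySem.Set.empty]
  · intro j hj; simp at hj
  · intro x
    simp [PySem.Set.empty, PySem.Set.ofList, PySem.Set.add, PySem.Set.contains]
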